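/- GENERATED by tools/from_farm_form.py from prooffarm-gif/accepted/run_ctors/Lemmas.lean (a worked proof of the farm's unit `run_ctors`,
   accepted by the verdict) — do not edit. -/
import Gif.Spec.Units.run_ctors
import Asan.CheckWalk
/-
  Pure facts for the unit `run_ctors`: the shadow after `registerMem` depends only on the shadow before; the descriptor table stays
  in memory under stack stores; the constants of this image's runtime record as the walker's literals.
-/

open X86 X86.User Asan ProgX.Base

namespace Gif.Spec.run_ctors

/-- Two memories that agree on a range still agree on it after the same byte store into both. -/
theorem rc_eqOn_write {lo hi : Nat} {m m' : Mem} (h : Mem.EqOn lo hi m m') (b : Word) (v : Byte) :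
    Mem.EqOn lo hi (m.write b v) (m'.write b v) := by
  intro a ha hb
  by_cases e : b = a
  · subst e
    rw [Mem.read_write_same, Mem.read_write_same]
  · rw [Mem.read_write_other _ _ _ _ e, Mem.read_write_other _ _ _ _ e]
    exact h a ha hb

/-- … after the same run of shadow stores (`fillMem`) into both. -/
theorem rc_eqOn_fillMem {lo hi : Nat} {m m' : Mem} (h : Mem.EqOn lo hi m m') (g : Nat) (v : Byte) (k : Nat) :
    Mem.EqOn lo hi (fillMem m g v k) (fillMem m' g v k) := by
  induction k generalizing m m' g with
  | zero => exact h
  | succ k ih =>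
    simp only [fillMem]
    exact ih (rc_eqOn_write h _ _) (g + 1)

/-- … after the registration of one global in both. -/
theorem rc_eqOn_registerOne {lo hi : Nat} {m m' : Mem} (h : Mem.EqOn lo hi m m') (d : GlobalDesc) :
    Mem.EqOn lo hi (registerOne m d) (registerOne m' d) := by
  unfold registerOne
  apply rc_eqOn_fillMem
  by_cases e : (d.beg + d.size) % 8 = 0
  · rw [if_pos e, if_pos e]
    exact h
  · rw [if_neg e, if_neg e]
    exact rc_eqOn_write h _ _

/-- **`registerMem` depends on the range only through the range**: two memories that agree on a range (the shadow) agree on it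
after the registration of the same descriptors. -/
theorem rc_eqOn_registerMem {lo hi : Nat} {m m' : Mem} (h : Mem.EqOn lo hi m m') (ds : List GlobalDesc) :
    Mem.EqOn lo hi (registerMem m ds) (registerMem m' ds) := by
  induction ds generalizing m m' with
  | nil => exact h
  | cons d ds ih =>
    have e1 : registerMem m (d :: ds) = registerMem (registerOne m d) ds := rfl
    have e2 : registerMem m' (d :: ds) = registerMem (registerOne m' d) ds := rfl
    rw [e1, e2]
    exact ih (rc_eqOn_registerOne h d)


/-- **The descriptor table stays in memory** under stores that leave a range `[lo, hi)` around the table alone. -/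
theorem rc_descsIn_eqOn {lo hi : Nat} {m m' : Mem} {table : Nat} {descs : List GlobalDesc} (h : Mem.EqOn lo hi m m')
    (hlo : lo ≤ table) (hhi : table + 64 * descs.length ≤ hi) (hmax : hi < 2 ^ 63) (hd : DescsIn m table descs) :
    DescsIn m' table descs := by
  intro i hi'
  obtain ⟨h1, h2, h3⟩ := hd i hi'
  have e1 : (UInt64.ofNat (table + 64 * i)).toNat = table + 64 * i := by
    rw [UInt64.toNat_ofNat']
    omega
  have e2 : (UInt64.ofNat (table + 64 * i + 8)).toNat = table + 64 * i + 8 := by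
    rw [UInt64.toNat_ofNat']
    omega
  have e3 : (UInt64.ofNat (table + 64 * i + 16)).toNat = table + 64 * i + 16 := by
    rw [UInt64.toNat_ofNat']
    omega
  refine ⟨?_, ?_, ?_⟩
  · rw [h.readLE _ 8 (by omega) (by omega) (by omega)]
    exact h1
  · rw [h.readLE _ 8 (by omega) (by omega) (by omega)]
    exact h2
  · rw [h.readLE _ 8 (by omega) (by omega) (by omega)]
    exact h3


/-- `__init_array_start` of this image, in the form the walker gives `ebx` after `mov ebx, 0x141000`. -/
theorem rc_initStart : UInt64.ofNat rt.sym.initArrayStart = Word.ofBV 1314816#32 := by decide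

/-- The constructor of the runtime record is the label `_sub_I_65535_1`. -/
theorem rc_ctorEntry : rt.sym.ctor = Gif.L._sub_I_65535_1.entry := by decide

/-- The descriptor table of this image lies in the image's data, below the stack region. -/
theorem rc_table_bounds : 0x100000 ≤ rt.table ∧ rt.table + 64 * rt.descs.length ≤ 0x700000 := by decide

/-- The windows of the constructor's contract, evaluated: the shadows of the eight slots of this image's globals, in table order. -/
theorem rc_ctor_writes (u : State) : (ctorSpec rt).writes u =
    [⟨12747360, 12747368⟩,
     ⟨12747368, 12747376⟩,
     ⟨12747376, 12747384⟩,
     ⟨12747872, 12747880⟩,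
     ⟨12747336, 12747344⟩,
     ⟨12747352, 12747360⟩,
     ⟨12747344, 12747352⟩,
     ⟨12747328, 12747336⟩] := id rfl

/-- The windows of `run_ctors`' own contract, evaluated: the same eight. -/
theorem rc_runCtors_writes (u : State) : (runCtorsSpec rt).writes u =
    [⟨12747360, 12747368⟩,
     ⟨12747368, 12747376⟩,
     ⟨12747376, 12747384⟩,
     ⟨12747872, 12747880⟩,
     ⟨12747336, 12747344⟩,
     ⟨12747352, 12747360⟩,
     ⟨12747344, 12747352⟩,
     ⟨12747328, 12747336⟩] := id rfl

end Gif.Spec.run_ctors
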